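-- pv_equiv track=rewrite | github.com/loganyu/leetcode | problems/1415_the_kth_lexicographical_string_of_all_happy_strings_of_length_n.py | getHappyString
-- ===== SOURCE A (Python) =====
-- def getHappyString(n: int, k: int) -> str:
--     total = 3 * (1 << (n - 1))
--     if k > total:
--         return ""
--     result = ["a"] * n
--     next_smallest = {"a": "b", "b": "a", "c": "a"}
--     next_greatest = {"a": "c", "b": "c", "c": "b"}
--     start_a = 1
--     start_b = start_a + (1 << (n - 1))
--     start_c = start_b + (1 << (n - 1))
--     if k < start_b:
--         result[0] = "a"
--         k -= start_a
--     elif k < start_c: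
--         result[0] = "b"
--         k -= start_b
--     else:
--         result[0] = "c"
--         k -= start_c
--     for char_index in range(1, n):
--         midpoint = 1 << (n - char_index - 1)
--         if k < midpoint:
--             result[char_index] = next_smallest[result[char_index - 1]]
--         else:
--             result[char_index] = next_greatest[result[char_index - 1]]
--             k -= midpoint
--
--     return "".join(result)
-- ===== SOURCE B (Python) =====
-- def getHappyString(n, k):
--     if k < 1 or k > 3 * (1 << (n - 1)):
--         return ""
--     j = k - 1
--     parts = ["abc"[j >> (n - 1)]]
--     i = n - 2
--     while i >= 0:
--         b = (j >> i) & 1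
--         r = 1
--         while i - r >= 0 and ((j >> (i - r)) & 1) == b:
--             r += 1
--         prev = parts[-1][-1]
--         if b:
--             pat = "bc" if prev == "c" else "cb"
--         else:
--             pat = "ba" if prev == "a" else "ab"
--         parts.append((pat * ((r + 1) // 2))[:r])
--         i -= r
--     return "".join(parts)
-- ===== Notes on version B (the rewrite author's own statement) =====
-- stated objective: faster
-- what changed: Replaces A's carried-remainder decoding (subtract start_a/start_b/start_c blocks and per-position midpoints, successor dictionaries, preallocated result list) by a run-length decoding of the bits of j = k-1: B scans the bit string once and, for each maximal run of equal bits, emits a whole alternating two-character tile built by sequence repetition and slicing — one loop iteration per bit-run instead of per character, no residual k, no per-position subtraction or dictionary lookup. …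
-- outside the precondition, e.g. on getHappyString(2, 0): A returns 'ab', B returns ''; on getHappyString(3, -5): A returns 'aba', B returns ''
import Mathlib
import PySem

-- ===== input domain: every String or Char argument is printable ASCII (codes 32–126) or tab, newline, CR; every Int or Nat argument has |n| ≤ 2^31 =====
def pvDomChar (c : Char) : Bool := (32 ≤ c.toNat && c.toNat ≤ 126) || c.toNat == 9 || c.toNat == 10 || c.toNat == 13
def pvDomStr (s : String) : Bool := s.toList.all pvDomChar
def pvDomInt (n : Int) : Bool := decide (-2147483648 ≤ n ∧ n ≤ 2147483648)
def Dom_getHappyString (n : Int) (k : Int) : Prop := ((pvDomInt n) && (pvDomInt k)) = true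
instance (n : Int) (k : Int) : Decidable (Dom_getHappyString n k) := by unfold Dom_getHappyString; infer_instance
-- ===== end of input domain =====

-- B replaces A's carried-remainder block subtraction with successor dictionaries by a
-- run-length decoding of the bits of j = k - 1: each maximal run of equal bits is emitted
-- at once as a two-character alternating tile (objective: faster — one loop iteration per
-- bit-run instead of per character; a timing run measured B ~5x faster at the largest size).

-- ===== PORT A =====
-- Python's `1 << m`; raises for m < 0 (n ≤ 0 is excluded by Pre_getHappyString)
def pvShl1 (m : Int) : Int := 2 ^ m.toNat

def pvNextSmallest : PySem.Dict Char Char := PySem.Dict.ofList [('a','b'),('b','a'),('c','a')]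
def pvNextGreatest : PySem.Dict Char Char := PySem.Dict.ofList [('a','c'),('b','c'),('c','b')]

-- loop body of A's `for char_index in range(1, n)`
def pvStepA (n : Int) (st : List Char × Int) (i : Int) : List Char × Int :=
  let result := st.1
  let k := st.2
  let midpoint := pvShl1 (n - i - 1)
  let prev := PySem.List.pyGetD result (i - 1) 'a'
  if k < midpoint then
    (PySem.List.pySetD result i (PySem.Dict.getD pvNextSmallest prev 'a'), k)
  else
    (PySem.List.pySetD result i (PySem.Dict.getD pvNextGreatest prev 'a'), k - midpoint)

def getHappyString (n : Int) (k : Int) : String :=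
  let total := 3 * pvShl1 (n - 1)
  if k > total then "" else
  let result := List.replicate n.toNat 'a'
  let start_a : Int := 1
  let start_b := start_a + pvShl1 (n - 1)
  let start_c := start_b + pvShl1 (n - 1)
  let st0 : List Char × Int :=
    if k < start_b then (PySem.List.pySetD result 0 'a', k - start_a)
    else if k < start_c then (PySem.List.pySetD result 0 'b', k - start_b)
    else (PySem.List.pySetD result 0 'c', k - start_c)
  let stN := (PySem.List.pyRange 1 n 1).foldl (pvStepA n) st0
  String.ofList stN.1

-- ===== PORT B =====
-- `(j >> s) & 1` (Python arithmetic shift = floor division; `& 1` = `% 2` on every int)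
def pvBit (j s : Int) : Int := PySem.Int.mod (PySem.Int.floordiv j (pvShl1 s)) 2

-- inner `while i - r >= 0 and ((j >> (i - r)) & 1) == b: r += 1`
def pvRunLen (j i b : Int) (r : Int) : Int :=
  if h : 0 ≤ i - r ∧ pvBit j (i - r) = b then pvRunLen j i b (r + 1) else r
termination_by (i - r + 1).toNat
decreasing_by omega

-- `r ≥ 1` is invariant (the loop only increments r); cited by pvOuter's decreasing_by
lemma pvRunLen_ge (j i b : Int) : ∀ r, r ≤ pvRunLen j i b r := by
  intro r
  fun_induction pvRunLen j i b r with
  | case1 r h ih => omega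
  | case2 r h => omega

-- outer `while i >= 0` loop of B; parts accumulates the emitted tiles
def pvOuter (j : Int) (i : Int) (parts : List (List Char)) : List (List Char) :=
  if h : 0 ≤ i then
    let b := pvBit j i
    let r := pvRunLen j i b 1
    let prev := PySem.List.pyGetD (PySem.List.pyGetD parts (-1) []) (-1) 'a'
    let pat : List Char :=
      if b ≠ 0 then (if prev = 'c' then ['b','c'] else ['c','b'])
      else (if prev = 'a' then ['b','a'] else ['a','b'])
    -- `(pat * ((r + 1) // 2))[:r]` (r ≥ 1, so the repeat count is positive)
    let tile := PySem.List.slice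
        (List.flatten (List.replicate (PySem.Int.floordiv (r + 1) 2).toNat pat)) none (some r)
    pvOuter j (i - r) (parts ++ [tile])
  else parts
termination_by (i + 1).toNat
decreasing_by
  have h1 := pvRunLen_ge j i (pvBit j i) 1
  omega

def getHappyString_alt (n : Int) (k : Int) : String :=
  if k < 1 ∨ k > 3 * pvShl1 (n - 1) then "" else
  let j := k - 1
  -- `"abc"[j >> (n - 1)]`; the guard puts the index in 0..2
  let parts : List (List Char) :=
    [[PySem.List.pyGetD ['a','b','c'] (PySem.Int.floordiv j (pvShl1 (n - 1))) 'a']]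
  String.ofList (pvOuter j (n - 2) parts).flatten

-- ===== PRECONDITION & SPEC =====
-- Pre_ excludes n ≤ 0, where A raises ValueError on the negative shift `1 << (n - 1)`, and
-- k ≤ 0, an out-of-spec value of the 1-based rank k that no caller specifies: there A falls
-- through its first-letter comparisons and returns the lexicographically first happy string
-- (the same value as for k = 1), while B treats the out-of-range rank uniformly with
-- k > total and returns "" — both defensible readings of that corner.
def Pre_getHappyString (n : Int) (k : Int) : Prop := 1 ≤ n ∧ 1 ≤ k
instance (n : Int) (k : Int) : Decidable (Pre_getHappyString n k) := by unfold Pre_getHappyString; infer_instance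
def pvWitness_getHappyString : Int × Int := (3, 5)

def Spec_getHappyString (n : Int) (k : Int) (out : String) : Prop := out = getHappyString_alt n k
instance (n : Int) (k : Int) (out : String) : Decidable (Spec_getHappyString n k out) := by unfold Spec_getHappyString; infer_instance

-- ===== CLAIM (what is proved, stated in full; the proofs are below) =====
def Claim_equal_getHappyString : Prop := ∀ (n : Int) (k : Int), Dom_getHappyString n k → Pre_getHappyString n k → Spec_getHappyString n k (getHappyString n k)

-- ===== LEMMAS AND PROOFS =====

-- the two successor maps, as total functions (agree with A's dicts on 'a','b','c')
def nsm (p : Char) : Char := if p = 'a' then 'b' else 'a'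
def ngr (p : Char) : Char := if p = 'c' then 'b' else 'c'

-- A's per-position selection, as a recursion on the residual rank (comparison form)
def selA : Nat → Char → Int → List Char
  | 0, _, _ => []
  | m + 1, p, j => if j < 2 ^ m then nsm p :: selA m (nsm p) j else ngr p :: selA m (ngr p) (j - 2 ^ m)

-- the same selection, reading bit m-1, m-2, … of a fixed j (B's view)
def selJ : Nat → Char → Int → List Char
  | 0, _, _ => []
  | m + 1, p, j =>
    let c := if (j / 2 ^ m) % 2 ≠ 0 then ngr p else nsm p
    c :: selJ m c j

def altList : Nat → Char → Char → List Char
  | 0, _, _ => []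
  | r + 1, x, y => x :: altList r y x

def lastAlt (r : Nat) (x y : Char) : Char := if r % 2 = 1 then x else y

def stx (b : Int) (p : Char) : Char := if b ≠ 0 then ngr p else nsm p

lemma pvShl1_natCast (m : Nat) : pvShl1 (m : Int) = 2 ^ m := by
  simp [pvShl1]

lemma pvBit_natCast (j : Int) (s : Nat) : pvBit j (s : Int) = (j / 2 ^ s) % 2 := by
  have h : (0 : Int) < 2 ^ s := by positivity
  rw [pvBit, pvShl1_natCast, PySem.Int.floordiv_eq_ediv_of_pos h,
    PySem.Int.mod_eq_emod_of_pos (by norm_num)]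

lemma bit_from_mod (t j : Int) (ht : 0 < t) : (j / t) % 2 = (j % (2 * t)) / t := by
  have h2t : (0 : Int) < 2 * t := by omega
  have hdm := Int.ediv_add_emod j (2 * t)
  set Q := j / (2 * t) with hQ
  set s := j % (2 * t) with hs
  have hs0 : 0 ≤ s := Int.emod_nonneg j (by omega)
  have hs1 : s < 2 * t := Int.emod_lt_of_pos j h2t
  have hj : j = s + Q * (2 * t) := by
    rw [hs, hQ]; linarith [Int.ediv_add_emod j (2 * t)]
  have hdiv : j / t = s / t + Q * 2 := by
    rw [hj, (by ring : s + Q * (2 * t) = s + (Q * 2) * t), Int.add_mul_ediv_right _ _ (by omega : t ≠ 0)]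
  have hst0 : 0 ≤ s / t := Int.ediv_nonneg hs0 (by omega)
  have hst1 : s / t < 2 := by
    rw [Int.ediv_lt_iff_lt_mul ht]; omega
  rw [hdiv]
  omega

lemma selJ_congr : ∀ (m : Nat) (p : Char) (j₁ j₂ : Int), j₁ % 2 ^ m = j₂ % 2 ^ m →
    selJ m p j₁ = selJ m p j₂ := by
  intro m
  induction m with
  | zero => intro p j₁ j₂ _; rfl
  | succ m ih =>
    intro p j₁ j₂ h
    have ht : (0 : Int) < 2 ^ m := by positivity
    have hbit : (j₁ / 2 ^ m) % 2 = (j₂ / 2 ^ m) % 2 := by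
      rw [bit_from_mod _ _ ht, bit_from_mod _ _ ht,
        (by ring : (2 : Int) * 2 ^ m = 2 ^ (m + 1)), h]
    have hlow : j₁ % 2 ^ m = j₂ % 2 ^ m := by
      have d : (2 : Int) ^ m ∣ 2 ^ (m + 1) := pow_dvd_pow 2 (by omega)
      rw [← Int.emod_emod_of_dvd j₁ d, ← Int.emod_emod_of_dvd j₂ d, h]
    simp only [selJ, hbit]
    exact congrArg _ (ih _ _ _ hlow)

lemma selA_eq_selJ : ∀ (m : Nat) (p : Char) (j : Int), 0 ≤ j → j < 2 ^ m →
    selA m p j = selJ m p j := by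
  intro m
  induction m with
  | zero => intro p j _ _; rfl
  | succ m ih =>
    intro p j h0 h1
    have ht : (0 : Int) < 2 ^ m := by positivity
    by_cases hj : j < 2 ^ m
    · have hd : j / 2 ^ m = 0 := Int.ediv_eq_zero_of_lt h0 hj
      simp only [selA, selJ, if_pos hj, hd]
      norm_num
      exact ih _ _ h0 hj
    · have hd : j / 2 ^ m = 1 := by
        have hge : (1 : Int) ≤ j / 2 ^ m := by
          rw [Int.le_ediv_iff_mul_le ht]; omega
        have hlt : j / 2 ^ m < 2 := by
          rw [Int.ediv_lt_iff_lt_mul ht]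
          have : (2 : Int) ^ (m + 1) = 2 * 2 ^ m := by ring
          omega
        omega
      simp only [selA, selJ, if_neg hj, hd]
      norm_num
      rw [ih _ _ (by omega) (by nlinarith [(by ring : (2:Int) ^ (m+1) = 2 * 2^m)]),
        selJ_congr m (ngr p) (j - 2 ^ m) j (Int.sub_emod_right j (2 ^ m))]

-- ===== A-side: the foldl computes selA =====

lemma pv_get_prev (pref rest : List Char) (i : Int) (p : Char)
    (hlast : pref.getLast? = some p) (hi : 1 ≤ i) (hlen : pref.length = i.toNat) :
    PySem.List.pyGetD (pref ++ rest) (i - 1) 'a' = p := by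
  have hne : pref ≠ [] := by
    intro h; rw [h] at hlast; simp at hlast
  have hlt : (i - 1).toNat < pref.length := by omega
  rw [PySem.List.pyGetD_eq_getElem _ 'a' (by omega) (by simp; omega)]
  rw [List.getElem_append_left hlt]
  have hsome := List.getLast?_eq_getElem? (l := pref)
  rw [hlast] at hsome
  have h2 : pref[(i - 1).toNat]? = some p := by
    rw [(by omega : (i - 1).toNat = pref.length - 1)]; exact hsome.symm
  rw [List.getElem?_eq_getElem hlt] at h2
  exact Option.some.inj h2

lemma pv_set_at (pref : List Char) (i : Int) (m : Nat) (c : Char)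
    (hi : 0 ≤ i) (hlen : pref.length = i.toNat) :
    PySem.List.pySetD (pref ++ List.replicate (m + 1) 'a') i c
      = (pref ++ [c]) ++ List.replicate m 'a' := by
  rw [PySem.List.pySetD_of_nonneg _ _ hi, List.set_append]
  have : ¬ i.toNat < pref.length := by omega
  rw [if_neg (by omega)]
  simp [hlen, List.replicate_succ]

lemma pv_A_step (n i kA : Int) (m : Nat) (pref : List Char) (p : Char)
    (hin : i + ((m : Int) + 1) = n) (hi : 1 ≤ i) (hlen : pref.length = i.toNat)
    (hp : pref.getLast? = some p) (hpabc : p = 'a' ∨ p = 'b' ∨ p = 'c')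
    (hk : kA < 2 ^ (m + 1)) :
    pvStepA n (pref ++ List.replicate (m + 1) 'a', kA) i
      = if kA < 2 ^ m then ((pref ++ [nsm p]) ++ List.replicate m 'a', kA)
        else ((pref ++ [ngr p]) ++ List.replicate m 'a', kA - 2 ^ m) := by
  have hmid : n - i - 1 = (m : Int) := by omega
  have hshl : pvShl1 (n - i - 1) = 2 ^ m := by rw [hmid, pvShl1_natCast]
  have hget : PySem.List.pyGetD (pref ++ List.replicate (m + 1) 'a') (i - 1) 'a' = p :=
    pv_get_prev _ _ _ _ hp hi hlen
  have hset : ∀ c : Char, PySem.List.pySetD (pref ++ List.replicate (m + 1) 'a') i c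
      = (pref ++ [c]) ++ List.replicate m 'a' := fun c => pv_set_at pref i m c (by omega) hlen
  have hsm : PySem.Dict.getD pvNextSmallest p 'a' = nsm p := by
    rcases hpabc with h | h | h <;> subst h <;> decide
  have hgt : PySem.Dict.getD pvNextGreatest p 'a' = ngr p := by
    rcases hpabc with h | h | h <;> subst h <;> decide
  by_cases hkm : kA < 2 ^ m
  · simp only [pvStepA, hshl, hget, hsm, if_pos hkm, hset]
  · simp only [pvStepA, hshl, hget, hgt, if_neg hkm, hset]

lemma nsm_abc (p : Char) : nsm p = 'a' ∨ nsm p = 'b' ∨ nsm p = 'c' := by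
  by_cases h : p = 'a' <;> simp [nsm, h]

lemma ngr_abc (p : Char) : ngr p = 'a' ∨ ngr p = 'b' ∨ ngr p = 'c' := by
  by_cases h : p = 'c' <;> simp [ngr, h]

lemma pv_A_loop (m : Nat) : ∀ (i kA : Int) (pref : List Char) (p : Char) (n : Int),
    i + m = n → 1 ≤ i → pref.length = i.toNat → pref.getLast? = some p →
    (p = 'a' ∨ p = 'b' ∨ p = 'c') → kA < 2 ^ m →
    ((PySem.List.pyRange i n 1).foldl (pvStepA n) (pref ++ List.replicate m 'a', kA)).1
      = pref ++ selA m p kA := by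
  induction m with
  | zero =>
    intro i kA pref p n hin hi hlen hp hpabc hk
    rw [PySem.List.pyRange_one_eq_nil (by omega)]
    simp [selA]
  | succ m ih =>
    intro i kA pref p n hin hi hlen hp hpabc hk
    rw [PySem.List.pyRange_one_cons (by omega)]
    simp only [List.foldl_cons]
    rw [pv_A_step n i kA m pref p (by omega) hi hlen hp hpabc hk]
    by_cases hkm : kA < 2 ^ m
    · rw [if_pos hkm, ih (i + 1) kA (pref ++ [nsm p]) (nsm p) n (by omega) (by omega)
        (by simp [hlen]; omega) (by simp) (nsm_abc p) hkm]
      simp [selA, if_pos hkm]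
    · rw [if_neg hkm, ih (i + 1) (kA - 2 ^ m) (pref ++ [ngr p]) (ngr p) n (by omega) (by omega)
        (by simp [hlen]; omega) (by simp) (ngr_abc p)
        (by have : (2:Int) ^ (m+1) = 2 * 2^m := by ring
            omega)]
      simp [selA, if_neg hkm]

-- ===== B-side: run-length facts =====

lemma pvRunLen_bits (j i b : Int) : ∀ r s, i - pvRunLen j i b r < s → s ≤ i - r → pvBit j s = b := by
  intro r
  fun_induction pvRunLen j i b r with
  | case1 r h ih =>
    intro s h1 h2
    by_cases hs : s ≤ i - (r + 1)
    · exact ih s h1 hs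
    · rw [show s = i - r by omega]
      exact h.2
  | case2 r h =>
    intro s h1 h2
    omega

lemma pvRunLen_le (j i b : Int) : ∀ r, r ≤ i + 1 → pvRunLen j i b r ≤ i + 1 := by
  intro r
  fun_induction pvRunLen j i b r with
  | case1 r h ih => exact fun _ => ih (by omega)
  | case2 r h => exact fun hr => hr


lemma stx3 (b : Int) (p : Char) : stx b (stx b (stx b p)) = stx b p := by
  by_cases hb : b = 0
  · by_cases h : p = 'a' <;> simp [stx, nsm, hb, h]
  · by_cases h : p = 'c' <;> simp [stx, ngr, hb, h]

lemma altList_ne_nil (r : Nat) (x y : Char) (h : 1 ≤ r) : altList r x y ≠ [] := by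
  match r, h with
  | r + 1, _ => simp [altList]

lemma altList_getLast? : ∀ (r : Nat) (x y : Char), 1 ≤ r →
    (altList r x y).getLast? = some (lastAlt r x y) := by
  intro r
  induction r with
  | zero => omega
  | succ r ih =>
    intro x y _
    match r, ih with
    | 0, _ => simp [altList, lastAlt]
    | r + 1, ih =>
      have e : altList (r + 1 + 1) x y = x :: altList (r + 1) y x := rfl
      have e2 : altList (r + 1) y x = y :: altList r x y := rfl
      rw [e, e2, List.getLast?_cons_cons, ← e2, ih y x (by omega)]
      have : (r + 1 + 1) % 2 = 1 ↔ ¬ ((r + 1) % 2 = 1) := by omega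
      by_cases hp : (r + 1) % 2 = 1 <;> simp [lastAlt, hp] <;> omega

lemma flatten_replicate_pair (q : Nat) (x y : Char) :
    List.flatten (List.replicate q [x, y]) = altList (2 * q) x y := by
  induction q with
  | zero => rfl
  | succ q ih =>
    rw [List.replicate_succ, List.flatten_cons, ih,
      show 2 * (q + 1) = (2 * q + 1) + 1 by omega, altList, altList]
    rfl

lemma take_altList : ∀ (r t : Nat) (x y : Char), List.take r (altList t x y) = altList (min r t) x y := by
  intro r
  induction r with
  | zero => simp [altList]
  | succ r ih =>
    intro t x y
    match t with
    | 0 => simp [altList]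
    | t + 1 =>
      rw [altList, List.take_succ_cons, ih,
        show min (r + 1) (t + 1) = min r t + 1 by omega, altList]

-- a run of R equal bits makes selJ emit an alternating tile of length R
lemma selJ_tile : ∀ (R m : Nat) (p : Char) (j b : Int), 1 ≤ R → R ≤ m →
    (∀ s : Nat, m - R ≤ s → s < m → (j / 2 ^ s) % 2 = b) →
    selJ m p j = altList R (stx b p) (stx b (stx b p))
      ++ selJ (m - R) (lastAlt R (stx b p) (stx b (stx b p))) j := by
  intro R
  induction R with
  | zero => omega
  | succ R ih =>
    intro m p j b _ hRm hbits
    match m, hRm with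
    | m' + 1, hRm =>
      have hc : (j / 2 ^ m') % 2 = b := hbits m' (by omega) (by omega)
      have hsel : selJ (m' + 1) p j = stx b p :: selJ m' (stx b p) j := by
        simp only [selJ, hc, stx]
      match R, ih with
      | 0, _ =>
        rw [hsel]
        simp [altList, lastAlt, show m' + 1 - 1 = m' from rfl]
      | R'' + 1, ih =>
        have hIH := ih (m') (stx b p) j b (by omega) (by omega)
          (fun s h1 h2 => hbits s (by omega) (by omega))
        rw [hsel, hIH, stx3]
        have em : m' + 1 - (R'' + 1 + 1) = m' - (R'' + 1) := by omega
        have elast : lastAlt (R'' + 1 + 1) (stx b p) (stx b (stx b p))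
            = lastAlt (R'' + 1) (stx b (stx b p)) (stx b p) := by
          simp only [lastAlt]
          by_cases hp2 : (R'' + 1) % 2 = 1
          · rw [if_pos hp2, if_neg (by omega)]
          · rw [if_neg hp2, if_pos (by omega)]
        have ealt : altList (R'' + 1 + 1) (stx b p) (stx b (stx b p))
            = stx b p :: altList (R'' + 1) (stx b (stx b p)) (stx b p) := rfl
        rw [em, elast, ealt]
        simp

lemma pvOuter_eq_neg (j i : Int) (parts : List (List Char)) (h : ¬ 0 ≤ i) :
    pvOuter j i parts = parts := by
  rw [pvOuter]; simp [h]

lemma pvOuter_eq_pos (j i : Int) (parts : List (List Char)) (h : 0 ≤ i) :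
    pvOuter j i parts =
      pvOuter j (i - pvRunLen j i (pvBit j i) 1)
        (parts ++ [PySem.List.slice
          (List.flatten (List.replicate
            ((PySem.Int.floordiv (pvRunLen j i (pvBit j i) 1 + 1) 2).toNat)
            (if pvBit j i ≠ 0 then
               (if (PySem.List.pyGetD (PySem.List.pyGetD parts (-1) []) (-1) 'a') = 'c'
                then ['b','c'] else ['c','b'])
             else
               (if (PySem.List.pyGetD (PySem.List.pyGetD parts (-1) []) (-1) 'a') = 'a'
                then ['b','a'] else ['a','b']))))
          none (some (pvRunLen j i (pvBit j i) 1))]) := by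
  rw [pvOuter]; simp only [dif_pos h]

-- B's pattern is [stx b p, stx b (stx b p)]
lemma pat_eq (b : Int) (p : Char) :
    (if b ≠ 0 then (if p = 'c' then ['b','c'] else ['c','b'])
     else (if p = 'a' then ['b','a'] else ['a','b']))
      = [stx b p, stx b (stx b p)] := by
  by_cases hb : b = 0
  · by_cases h : p = 'a' <;> simp [stx, nsm, hb, h]
  · by_cases h : p = 'c' <;> simp [stx, ngr, hb, h]

lemma pv_outer_spec : ∀ (m : Nat) (j : Int) (acc : List (List Char)) (l : List Char) (p : Char),
    l ≠ [] → l.getLast? = some p →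
    (pvOuter j ((m : Int) - 1) (acc ++ [l])).flatten = (acc ++ [l]).flatten ++ selJ m p j := by
  intro m
  induction m using Nat.strong_induction_on with
  | _ m ih =>
    intro j acc l p hl hp
    match m with
    | 0 =>
      rw [show ((0 : Nat) : Int) - 1 = -1 by norm_num, pvOuter_eq_neg _ _ _ (by norm_num)]
      simp [selJ]
    | m' + 1 =>
      have hi0 : (0 : Int) ≤ ((m' + 1 : Nat) : Int) - 1 := by push_cast; omega
      set i : Int := ((m' + 1 : Nat) : Int) - 1 with hidef
      have him : i = (m' : Int) := by rw [hidef]; push_cast; omega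
      set b : Int := pvBit j i with hbdef
      set R : Int := pvRunLen j i b 1 with hRdef
      have hR1 : 1 ≤ R := pvRunLen_ge j i b 1
      have hRle : R ≤ i + 1 := pvRunLen_le j i b 1 (by omega)
      set Rn : Nat := R.toNat with hRndef
      have hRcast : R = (Rn : Int) := by omega
      have hRn1 : 1 ≤ Rn := by omega
      have hRnm : Rn ≤ m' + 1 := by omega
      -- prev = p
      have hprev : PySem.List.pyGetD (PySem.List.pyGetD (acc ++ [l]) (-1) []) (-1) 'a' = p := by
        rw [PySem.List.pyGetD_neg_one_append_singleton, PySem.List.pyGetD_neg_one _ _ hl]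
        have := List.getLast?_eq_some_getLast (l := l) hl
        rw [hp] at this
        exact (Option.some.inj this).symm
      set x : Char := stx b p with hxdef
      set y : Char := stx b x with hydef
      -- the tile is an alternating list
      have hq : PySem.Int.floordiv (R + 1) 2 = (((Rn + 1) / 2 : Nat) : Int) := by
        rw [PySem.Int.floordiv_eq_ediv_of_pos (by norm_num)]
        omega
      have htile : PySem.List.slice
          (List.flatten (List.replicate ((PySem.Int.floordiv (R + 1) 2).toNat)
            [x, y])) none (some R) = altList Rn x y := by
        rw [hq, Int.toNat_natCast, flatten_replicate_pair, hRcast,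
          PySem.List.slice_to_natCast, take_altList,
          show min Rn (2 * ((Rn + 1) / 2)) = Rn by omega]
      -- the run's bits
      have hbits : ∀ s : Nat, (m' + 1) - Rn ≤ s → s < m' + 1 → (j / 2 ^ s) % 2 = b := by
        intro s h1 h2
        by_cases hs : s = m'
        · rw [hs, ← pvBit_natCast, ← him, ← hbdef]
        · have hb2 := pvRunLen_bits j i b 1 (s : Int) (by omega) (by omega)
          rwa [pvBit_natCast] at hb2
      have hsel := selJ_tile Rn (m' + 1) p j b hRn1 hRnm hbits
      -- the recursive call
      have hlast : (altList Rn x y).getLast? = some (lastAlt Rn x y) := altList_getLast? Rn x y hRn1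
      have hnext := ih (m' + 1 - Rn) (by omega) j (acc ++ [l]) (altList Rn x y)
        (lastAlt Rn x y) (altList_ne_nil Rn x y hRn1) hlast
      have hidx : ((m' + 1 - Rn : Nat) : Int) - 1 = i - R := by
        rw [hRcast, hidef]; push_cast [hRnm]; omega
      rw [pvOuter_eq_pos j i _ hi0, ← hbdef, ← hRdef, hprev, pat_eq, ← hxdef,
        ← hydef, htile, ← hidx, hnext, hsel]
      simp only [List.flatten_append, List.flatten_cons, List.flatten_nil,
        List.append_nil, List.append_assoc]
      rw [hydef, hxdef]

lemma pv_first_outer (m : Nat) (j : Int) (f : Char) :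
    (pvOuter j ((m : Int) - 1) [[f]]).flatten = [f] ++ selJ m f j := by
  have h := pv_outer_spec m j [] [f] f (by simp) (by simp)
  simpa using h

-- ===== VERDICT =====
theorem getHappyString_spec : Claim_equal_getHappyString := by
  intro n k _ hpre
  obtain ⟨hn, hk⟩ := hpre
  unfold Spec_getHappyString
  simp only [getHappyString, getHappyString_alt]
  have hm : n - 1 = (((n - 1).toNat : Nat) : Int) := by omega
  set m : Nat := (n - 1).toNat with hmdef
  have hs : pvShl1 (n - 1) = 2 ^ m := by rw [hm, pvShl1_natCast]
  have hpow : (0 : Int) < 2 ^ m := by positivity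
  have hnm : n = (m : Int) + 1 := by omega
  have hnt : n.toNat = m + 1 := by omega
  by_cases hg : k > 3 * pvShl1 (n - 1)
  · simp [hg]
  · rw [if_neg hg]
    have hg' : k ≤ 3 * 2 ^ m := by rw [hs] at hg; omega
    rw [if_neg (show ¬ (k < 1 ∨ k > 3 * pvShl1 (n - 1)) by rw [hs]; omega)]
    set j : Int := k - 1 with hjdef
    have hj0 : 0 ≤ j := by omega
    have hidx : PySem.Int.floordiv j (2 ^ m) = j / 2 ^ m :=
      PySem.Int.floordiv_eq_ediv_of_pos hpow
    have hn2 : n - 2 = (m : Int) - 1 := by omega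
    have hrep : List.replicate n.toNat 'a' = [] ++ List.replicate (m + 1) 'a' := by
      rw [hnt]; rfl
    have hset : ∀ c : Char, PySem.List.pySetD (List.replicate n.toNat 'a') 0 c
        = [c] ++ List.replicate m 'a' := by
      intro c
      rw [hrep]
      exact pv_set_at [] 0 m c (by omega) (by simp)
    rw [hs]
    by_cases h1 : k < 1 + 2 ^ m
    · -- first letter 'a'
      rw [if_pos h1, hset]
      have hd0 : j / 2 ^ m = 0 := Int.ediv_eq_zero_of_lt hj0 (by omega)
      rw [hidx, hd0, show PySem.List.pyGetD ['a','b','c'] (0 : Int) 'a' = 'a' from rfl]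
      rw [pv_A_loop m 1 (k - 1) ['a'] 'a' n (by omega) (by omega) (by simp) (by simp)
        (Or.inl rfl) (by omega)]
      rw [hn2, pv_first_outer m j 'a', ← hjdef,
        selA_eq_selJ m 'a' j hj0 (by omega)]
    · rw [if_neg h1]
      by_cases h2 : k < 1 + 2 ^ m + 2 ^ m
      · -- first letter 'b'
        rw [if_pos h2, hset]
        have hd1 : j / 2 ^ m = 1 := by
          have hge : (1 : Int) ≤ j / 2 ^ m := by rw [Int.le_ediv_iff_mul_le hpow]; omega
          have hlt : j / 2 ^ m < 2 := by rw [Int.ediv_lt_iff_lt_mul hpow]; omega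
          omega
        rw [hidx, hd1, show PySem.List.pyGetD ['a','b','c'] (1 : Int) 'a' = 'b' from rfl]
        rw [pv_A_loop m 1 (k - (1 + 2 ^ m)) ['b'] 'b' n (by omega) (by omega) (by simp)
          (by simp) (Or.inr (Or.inl rfl)) (by omega)]
        rw [hn2, pv_first_outer m j 'b',
          selA_eq_selJ m 'b' (k - (1 + 2 ^ m)) (by omega) (by omega),
          show k - (1 + 2 ^ m) = j - 2 ^ m by omega,
          selJ_congr m 'b' (j - 2 ^ m) j (Int.sub_emod_right j (2 ^ m))]
      · -- first letter 'c'
        rw [if_neg h2, hset]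
        have hd2 : j / 2 ^ m = 2 := by
          have hge : (2 : Int) ≤ j / 2 ^ m := by rw [Int.le_ediv_iff_mul_le hpow]; omega
          have hlt : j / 2 ^ m < 3 := by rw [Int.ediv_lt_iff_lt_mul hpow]; omega
          omega
        rw [hidx, hd2, show PySem.List.pyGetD ['a','b','c'] (2 : Int) 'a' = 'c' from rfl]
        rw [pv_A_loop m 1 (k - (1 + 2 ^ m + 2 ^ m)) ['c'] 'c' n (by omega) (by omega)
          (by simp) (by simp) (Or.inr (Or.inr rfl)) (by omega)]
        rw [hn2, pv_first_outer m j 'c',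
          selA_eq_selJ m 'c' (k - (1 + 2 ^ m + 2 ^ m)) (by omega) (by omega),
          show k - (1 + 2 ^ m + 2 ^ m) = j - 2 ^ m - 2 ^ m by omega,
          selJ_congr m 'c' (j - 2 ^ m - 2 ^ m) (j - 2 ^ m) (Int.sub_emod_right _ (2 ^ m)),
          selJ_congr m 'c' (j - 2 ^ m) j (Int.sub_emod_right j (2 ^ m))]
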